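-- pv_equiv track=rewrite | github.com/reactorlabs/testr | testr/targets/__init__.py | vectorSkipWhitespaceDecoder
-- ===== SOURCE A (Python) =====
-- def vectorSkipWhitespaceDecoder(output):
-- 	""" Given the output, it transforms it to a single vector of all values contained in it separated by space and no other whitespace characters anywhere between them. """
-- 	result = ""
-- 	lastWhitespace = False
-- 	insideBrackets = False
-- 	for c in output:
-- 		if (c in ('[','<')):
-- 			insideBrackets = True
-- 			continue
-- 		if (insideBrackets):
-- 			if (c in (']','>')):
-- 				insideBrackets = False
-- 			continue
-- 		if (c in (' ','\n', '\t')):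
-- 			if (not lastWhitespace):
-- 				result += " "
-- 				lastWhitespace = True
-- 		else:
-- 			lastWhitespace = False
-- 			result += str(c)
-- 	return result.strip()
-- ===== SOURCE B (Python) =====
-- def vectorSkipWhitespaceDecoder(output):
-- 	""" Two-phase rewrite: (1) drop bracketed regions with an index scan, (2) extract whitespace-free words and join them with single spaces. """
-- 	kept = []
-- 	i, n = 0, len(output)
-- 	while i < n:
-- 		c = output[i]
-- 		if c in '[<':
-- 			i += 1
-- 			while i < n and output[i] not in ']>':
-- 				i += 1
-- 			i += 1  # consume the closing bracket (or run off the end)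
-- 		else:
-- 			kept.append(c)
-- 			i += 1
-- 	text = ''.join(' ' if ch in ' \t\n' else ch for ch in kept)
-- 	words = []
-- 	i, n = 0, len(text)
-- 	while i < n:
-- 		if text[i] == ' ':
-- 			i += 1
-- 			continue
-- 		j = i
-- 		while j < n and text[j] != ' ':
-- 			j += 1
-- 		words.append(text[i:j])
-- 		i = j
-- 	return ' '.join(words).strip()
-- ===== Notes on version B (the rewrite author's own statement) =====
-- stated objective: alternative
-- what changed: Replaces A's single-pass three-flag character state machine with two independent phases: an index scan that deletes bracketed regions, then a word-extraction scan whose words are joined with single spaces.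
import Mathlib
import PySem

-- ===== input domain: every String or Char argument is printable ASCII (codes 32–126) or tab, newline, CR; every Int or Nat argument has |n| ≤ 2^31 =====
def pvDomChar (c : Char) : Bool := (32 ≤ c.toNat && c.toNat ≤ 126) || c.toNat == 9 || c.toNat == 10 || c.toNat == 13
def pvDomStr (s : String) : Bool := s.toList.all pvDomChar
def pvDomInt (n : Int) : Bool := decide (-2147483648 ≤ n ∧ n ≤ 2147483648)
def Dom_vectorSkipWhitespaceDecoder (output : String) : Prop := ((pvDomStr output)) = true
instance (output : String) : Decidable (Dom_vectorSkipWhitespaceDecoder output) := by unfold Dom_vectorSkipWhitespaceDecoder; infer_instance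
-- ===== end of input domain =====

-- B re-implements A's single-pass three-flag state machine as two independent phases
-- (bracket-region deletion scan, then word extraction joined with single spaces): alternative decomposition, same cost.


-- ===== PORT A =====
-- the for-loop with state (result, lastWhitespace, insideBrackets), transliterated as structural recursion
def pvLoopA : List Char → List Char → Bool → Bool → List Char
  | [], res, _, _ => res
  | c :: t, res, lw, ib =>
    if c == '[' || c == '<' then pvLoopA t res lw true
    else if ib then
      (if c == ']' || c == '>' then pvLoopA t res lw false else pvLoopA t res lw ib)
    else if c == ' ' || c == '\n' || c == '\t' then
      (if lw then pvLoopA t res lw ib else pvLoopA t (res ++ [' ']) true ib)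
    else pvLoopA t (res ++ [c]) false ib

def vectorSkipWhitespaceDecoder (output : String) : String :=
  String.ofList (PySem.Chars.strip (pvLoopA output.toList [] false false))

-- ===== PORT B =====
-- phase 1 of Source B: the while-loop with the inner closer-seeking scan
def pvStripBrackets : List Char → List Char
  | [] => []
  | c :: t =>
    if c == '[' || c == '<' then
      pvStripBrackets ((t.dropWhile (fun d => !(d == ']' || d == '>'))).drop 1)
    else c :: pvStripBrackets t
termination_by l => l.length
decreasing_by
· have h := List.length_dropWhile_le (fun d => !(d == ']' || d == '>')) t
  simp only [List.length_drop, List.length_cons]; omega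
· simp

-- phase 2 of Source B: the word-extraction while-loop (inner scan = takeWhile/dropWhile)
def pvWords : List Char → List (List Char)
  | [] => []
  | c :: t =>
    if c == ' ' then pvWords t
    else (c :: t.takeWhile (fun d => !(d == ' '))) :: pvWords (t.dropWhile (fun d => !(d == ' ')))
termination_by l => l.length
decreasing_by
· simp
· have h := List.length_dropWhile_le (fun d => !(d == ' ')) t
  simp only [List.length_cons]; omega

def vectorSkipWhitespaceDecoder_alt (output : String) : String :=
  let kept := pvStripBrackets output.toList
  let text := kept.map (fun ch => if ch == ' ' || ch == '\t' || ch == '\n' then ' ' else ch)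
  String.ofList (PySem.Chars.strip (PySem.Chars.join [' '] (pvWords text)))

-- ===== PRECONDITION & SPEC =====
def Spec_vectorSkipWhitespaceDecoder (output : String) (out : String) : Prop := out = vectorSkipWhitespaceDecoder_alt output
instance (output : String) (out : String) : Decidable (Spec_vectorSkipWhitespaceDecoder output out) := by unfold Spec_vectorSkipWhitespaceDecoder; infer_instance

-- ===== CLAIM (what is proved, stated in full; the proofs are below) =====
def Claim_equal_vectorSkipWhitespaceDecoder : Prop := ∀ (output : String), Dom_vectorSkipWhitespaceDecoder output → Spec_vectorSkipWhitespaceDecoder output (vectorSkipWhitespaceDecoder output)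

-- ===== LEMMAS AND PROOFS =====

-- A's whitespace test, the normalisation Source B's phase 2 applies, and the bracket-free collapse machine
def pvWs (c : Char) : Bool := c == ' ' || c == '\n' || c == '\t'
def pvNorm (c : Char) : Char := if c == ' ' || c == '\t' || c == '\n' then ' ' else c
def pvFC : Bool → List Char → List Char
  | _, [] => []
  | lw, c :: t =>
    if pvWs c then (if lw then pvFC lw t else ' ' :: pvFC true t) else c :: pvFC false t

def pvJ (l : List Char) : List Char := List.intercalate [' '] (pvWords (l.map pvNorm))
def pvEndsWs (l : List Char) : Bool := match l.getLast? with | some c => pvWs c | none => false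
def pvPad (l : List Char) : List Char := if pvEndsWs l && !(pvJ l).isEmpty then [' '] else []
def pvLead (l : List Char) : List Char := match l with | [] => [] | c :: _ => if pvWs c then [' '] else []

theorem pvNorm_eq_space_iff (c : Char) : (pvNorm c == ' ') = pvWs c := by
  unfold pvNorm pvWs
  by_cases h1 : c = ' ' <;> by_cases h2 : c = '\n' <;> by_cases h3 : c = '\t' <;> subst_vars <;>
    first
    | decide
    | (have e1 : (c == ' ') = false := beq_eq_false_iff_ne.mpr h1
       have e2 : (c == '\n') = false := beq_eq_false_iff_ne.mpr h2
       have e3 : (c == '\t') = false := beq_eq_false_iff_ne.mpr h3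
       simp [e1, e2, e3])

theorem pvNorm_of_not_ws {c : Char} (h : pvWs c = false) : pvNorm c = c := by
  unfold pvWs at h
  simp only [Bool.or_eq_false_iff] at h
  unfold pvNorm
  simp [h.1.1, h.1.2, h.2]

theorem pvNorm_of_ws {c : Char} (h : pvWs c = true) : pvNorm c = ' ' := by
  have := pvNorm_eq_space_iff c
  rw [h] at this
  exact eq_of_beq this

theorem pvPred_comp : ((fun d => !(d == ' ')) ∘ pvNorm) = (fun d => !pvWs d) := by
  funext d
  simp [Function.comp, pvNorm_eq_space_iff]

-- inside brackets the machine skips to just past the first closer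
theorem pvLoopA_true (t res lw) :
    pvLoopA t res lw true
      = pvLoopA ((t.dropWhile (fun d => !(d == ']' || d == '>'))).drop 1) res lw false := by
  induction t with
  | nil => simp [pvLoopA]
  | cons c t ih =>
    by_cases hop : (c == '[' || c == '<') = true
    · have hc : (c == ']' || c == '>') = false := by
        rcases (by simpa using hop : c = '[' ∨ c = '<') with h | h <;> subst h <;> decide
      rw [show pvLoopA (c :: t) res lw true = pvLoopA t res lw true from by simp [pvLoopA, hop]]
      rw [List.dropWhile_cons, if_pos (by simp [hc])]
      exact ih
    · by_cases hc : (c == ']' || c == '>') = true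
      · rw [show pvLoopA (c :: t) res lw true = pvLoopA t res lw false from by simp [pvLoopA, hop, hc]]
        rw [List.dropWhile_cons, if_neg (by simp [hc])]
        simp
      · rw [show pvLoopA (c :: t) res lw true = pvLoopA t res lw true from by simp [pvLoopA, hop, hc]]
        rw [List.dropWhile_cons, if_pos (by simp [hc])]
        exact ih

-- the machine factors through bracket deletion
theorem pvLoopA_eq_fc (n : Nat) : ∀ (l : List Char), l.length ≤ n → ∀ (res : List Char) (lw : Bool),
    pvLoopA l res lw false = res ++ pvFC lw (pvStripBrackets l) := by
  induction n with
  | zero =>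
    intro l h res lw
    have : l = [] := by cases l <;> simp_all
    subst this
    simp [pvLoopA, pvStripBrackets, pvFC]
  | succ n ih =>
    intro l h res lw
    cases l with
    | nil => simp [pvLoopA, pvStripBrackets, pvFC]
    | cons c t =>
      have ht : t.length ≤ n := by simp at h; omega
      by_cases hop : (c == '[' || c == '<') = true
      · rw [show pvLoopA (c :: t) res lw false = pvLoopA t res lw true from by simp [pvLoopA, hop]]
        rw [pvLoopA_true]
        have hlen : ((t.dropWhile (fun d => !(d == ']' || d == '>'))).drop 1).length ≤ n := by
          have := List.length_dropWhile_le (fun d => !(d == ']' || d == '>')) t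
          simp only [List.length_drop]; omega
        rw [ih _ hlen]
        have hsb : pvStripBrackets (c :: t)
            = pvStripBrackets ((t.dropWhile (fun d => !(d == ']' || d == '>'))).drop 1) := by
          rw [pvStripBrackets]; rw [if_pos hop]
        rw [hsb]
      · have hsb : pvStripBrackets (c :: t) = c :: pvStripBrackets t := by
          rw [pvStripBrackets]; rw [if_neg (by simp_all)]
        by_cases hws : (c == ' ' || c == '\n' || c == '\t') = true
        · cases lw with
          | true =>
            rw [show pvLoopA (c :: t) res true false = pvLoopA t res true false from by
              simp [pvLoopA, hop, hws]]
            rw [ih _ ht, hsb]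
            have hfc : pvFC true (c :: pvStripBrackets t) = pvFC true (pvStripBrackets t) := by
              simp [pvFC, pvWs, hws]
            rw [hfc]
          | false =>
            rw [show pvLoopA (c :: t) res false false = pvLoopA t (res ++ [' ']) true false from by
              simp [pvLoopA, hop, hws]]
            rw [ih _ ht, hsb]
            have hfc : pvFC false (c :: pvStripBrackets t) = ' ' :: pvFC true (pvStripBrackets t) := by
              simp [pvFC, pvWs, hws]
            rw [hfc]; simp
        · rw [show pvLoopA (c :: t) res lw false = pvLoopA t (res ++ [c]) false false from by
            simp [pvLoopA, hop, hws]]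
          rw [ih _ ht, hsb]
          have hfc : pvFC lw (c :: pvStripBrackets t) = c :: pvFC false (pvStripBrackets t) := by
            cases lw <;> simp [pvFC, pvWs, hws]
          rw [hfc]; simp

-- the machine in mid-word state
theorem pvFC_false_midword (t : List Char) :
    pvFC false t = t.takeWhile (fun d => !pvWs d)
      ++ (match t.dropWhile (fun d => !pvWs d) with
          | [] => ([] : List Char)
          | _ :: u' => ' ' :: pvFC true u') := by
  induction t with
  | nil => simp [pvFC]
  | cons c t ih =>
    by_cases h : pvWs c = true
    · simp [pvFC, h]
    · simp only [Bool.not_eq_true] at h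
      simp [pvFC, h, ih]

theorem pvWords_nil_iff_aux (n : Nat) : ∀ (m : List Char), m.length ≤ n →
    (pvWords m = [] ↔ ∀ c ∈ m, c = ' ') := by
  induction n with
  | zero =>
    intro m h
    have : m = [] := by cases m <;> simp_all
    subst this; simp [pvWords]
  | succ n ih =>
    intro m h
    cases m with
    | nil => simp [pvWords]
    | cons c t =>
      have ht : t.length ≤ n := by simp at h; omega
      by_cases hc : (c == ' ') = true
      · have hc' : c = ' ' := eq_of_beq hc
        rw [show pvWords (c :: t) = pvWords t from by rw [pvWords]; rw [if_pos hc]]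
        rw [ih t ht]
        simp [hc']
      · rw [show pvWords (c :: t)
            = (c :: t.takeWhile (fun d => !(d == ' '))) :: pvWords (t.dropWhile (fun d => !(d == ' ')))
          from by rw [pvWords]; rw [if_neg hc]]
        simp only [List.mem_cons]
        constructor
        · intro hfalse; exact absurd hfalse (by simp)
        · intro hall
          exact absurd (hall c (Or.inl rfl)) (by simpa using hc)

theorem pvWords_nil_iff (m : List Char) : pvWords m = [] ↔ ∀ c ∈ m, c = ' ' :=
  pvWords_nil_iff_aux m.length m le_rfl

theorem pvWords_ne_nil_aux (n : Nat) : ∀ (m : List Char), m.length ≤ n →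
    ∀ w ∈ pvWords m, w ≠ [] := by
  induction n with
  | zero =>
    intro m h
    have : m = [] := by cases m <;> simp_all
    subst this; simp [pvWords]
  | succ n ih =>
    intro m h w hw
    cases m with
    | nil => simp [pvWords] at hw
    | cons c t =>
      have ht : t.length ≤ n := by simp at h; omega
      by_cases hc : (c == ' ') = true
      · rw [show pvWords (c :: t) = pvWords t from by rw [pvWords]; rw [if_pos hc]] at hw
        exact ih t ht w hw
      · rw [show pvWords (c :: t)
            = (c :: t.takeWhile (fun d => !(d == ' '))) :: pvWords (t.dropWhile (fun d => !(d == ' ')))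
          from by rw [pvWords]; rw [if_neg hc]] at hw
        rcases List.mem_cons.mp hw with rfl | hw'
        · simp
        · exact ih _ (le_trans (List.length_dropWhile_le _ t) ht) w hw'

theorem pvWords_ne_nil {m w : List Char} (hw : w ∈ pvWords m) : w ≠ [] :=
  pvWords_ne_nil_aux m.length m le_rfl w hw

theorem pvInter_cons (w : List Char) (ws : List (List Char)) :
    List.intercalate [' '] (w :: ws)
      = w ++ (if ws = [] then [] else ' ' :: List.intercalate [' '] ws) := by
  cases ws with
  | nil => simp [List.intercalate]
  | cons v ws' => simp [List.intercalate, List.intersperse]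

theorem pvDropWhile_head {p : Char → Bool} : ∀ {t : List Char} {w : Char} {u' : List Char},
    t.dropWhile p = w :: u' → p w = false := by
  intro t
  induction t with
  | nil => intro w u' h; simp at h
  | cons c t ih =>
    intro w u' h
    rw [List.dropWhile_cons] at h
    by_cases hc : p c = true
    · rw [if_pos hc] at h; exact ih h
    · rw [if_neg hc] at h
      cases h
      simpa using hc

-- main: the collapse machine = words joined with single spaces, plus a trailing pad
theorem pvFC_true_eq (n : Nat) : ∀ (l : List Char), l.length ≤ n →
    pvFC true l = pvJ l ++ pvPad l := by
  induction n with
  | zero =>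
    intro l h
    have : l = [] := by cases l <;> simp_all
    subst this
    simp [pvFC, pvJ, pvPad, pvEndsWs, pvWords, List.intercalate]
  | succ n ih =>
    intro l h
    cases l with
    | nil => simp [pvFC, pvJ, pvPad, pvEndsWs, pvWords, List.intercalate]
    | cons c t =>
      have ht : t.length ≤ n := by simp at h; omega
      by_cases hw : pvWs c = true
      · -- whitespace head: dropped by both sides
        have h1 : pvFC true (c :: t) = pvFC true t := by simp [pvFC, hw]
        have hnc : pvNorm c = ' ' := pvNorm_of_ws hw
        have hJ : pvJ (c :: t) = pvJ t := by
          unfold pvJ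
          rw [List.map_cons, hnc]
          rw [show pvWords (' ' :: List.map pvNorm t) = pvWords (List.map pvNorm t) from by
            rw [pvWords]; simp]
        cases t with
        | nil =>
          have hJ0 : pvJ [c] = [] := by rw [hJ]; simp [pvJ, pvWords, List.intercalate]
          rw [h1, hJ0]
          simp [pvFC, pvPad, hJ0]
        | cons d t' =>
          rw [h1, ih _ ht, hJ]
          have hP : pvPad (c :: d :: t') = pvPad (d :: t') := by
            unfold pvPad pvEndsWs
            rw [List.getLast?_cons_cons, hJ]
          rw [hP]
      · -- word head
        have hwf : pvWs c = false := by simpa using hw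
        have hcs : (c == ' ') = false := by
          unfold pvWs at hwf; simp only [Bool.or_eq_false_iff] at hwf; exact hwf.1.1
        have hnc : pvNorm c = c := pvNorm_of_not_ws hwf
        have h1 : pvFC true (c :: t) = c :: pvFC false t := by simp [pvFC, hwf]
        have hmw := pvFC_false_midword t
        have htne : t.takeWhile (fun d => !pvWs d) ++ t.dropWhile (fun d => !pvWs d) = t :=
          List.takeWhile_append_dropWhile
        have hmapa : List.map pvNorm (t.takeWhile (fun d => !pvWs d)) = t.takeWhile (fun d => !pvWs d) := by
          rw [List.map_congr_left (g := id) (fun x hx => by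
            exact pvNorm_of_not_ws (by simpa using List.mem_takeWhile_imp hx))]
          exact List.map_id _
        have hJ : pvJ (c :: t)
            = (c :: t.takeWhile (fun d => !pvWs d))
              ++ (if pvWords (List.map pvNorm (t.dropWhile (fun d => !pvWs d))) = [] then []
                  else ' ' :: List.intercalate [' ']
                        (pvWords (List.map pvNorm (t.dropWhile (fun d => !pvWs d))))) := by
          unfold pvJ
          rw [List.map_cons, hnc]
          rw [show pvWords (c :: List.map pvNorm t)
              = (c :: (List.map pvNorm t).takeWhile (fun d => !(d == ' ')))
                :: pvWords ((List.map pvNorm t).dropWhile (fun d => !(d == ' ')))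
            from by rw [pvWords]; rw [if_neg (by simp [hcs])]]
          rw [List.takeWhile_map, List.dropWhile_map, pvPred_comp, hmapa]
          rw [pvInter_cons]
        rcases hu : t.dropWhile (fun d => !pvWs d) with _ | ⟨w, u'⟩
        · -- no whitespace anywhere in t
          have hall : ∀ d ∈ t, pvWs d = false := by
            intro d hd
            have := List.dropWhile_eq_nil_iff.mp hu d hd
            simpa using this
          have hPnil : pvWords (List.map pvNorm ([] : List Char)) = [] := by simp [pvWords]
          have hmw0 : pvFC false t = t.takeWhile (fun d => !pvWs d) ++ [] := by rw [hmw, hu]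
          rw [h1, hmw0]
          rw [hJ, hu, hPnil]
          have hend : pvEndsWs (c :: t) = false := by
            unfold pvEndsWs
            rcases hgl : (c :: t).getLast? with _ | x
            · rfl
            · have hx := List.mem_of_getLast? hgl
              rcases List.mem_cons.mp hx with rfl | hxt
              · exact hwf
              · exact hall x hxt
          simp [pvPad, hend]
        · -- t = word-part ++ (w :: u') with w whitespace
          have hune : t.dropWhile (fun d => !pvWs d) ≠ [] := by rw [hu]; simp
          have hwws : pvWs w = true := by
            have hh := pvDropWhile_head hu
            simpa using hh
          have hulen : (w :: u').length ≤ t.length := by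
            rw [← hu]; exact List.length_dropWhile_le _ t
          have ihu := ih (w :: u') (le_trans hulen ht)
          have hfu : pvFC true (w :: u') = pvFC true u' := by simp [pvFC, hwws]
          have hJu : pvJ (w :: u') = List.intercalate [' '] (pvWords (List.map pvNorm (w :: u'))) := rfl
          have hmw' : pvFC false t = t.takeWhile (fun d => !pvWs d) ++ (' ' :: pvFC true u') := by
            rw [hmw, hu]
          rw [h1, hmw']
          rw [hJ, hu]
          by_cases hP : pvWords (List.map pvNorm (w :: u')) = []
          · -- everything after the word is whitespace
            have hJu0 : pvJ (w :: u') = [] := by rw [hJu, hP]; simp [List.intercalate]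
            have hPadu : pvPad (w :: u') = [] := by simp [pvPad, hJu0]
            have huws : ∀ d ∈ (w :: u'), pvWs d = true := by
              intro d hd
              have hnd : pvNorm d = ' ' :=
                (pvWords_nil_iff _).mp hP (pvNorm d) (List.mem_map_of_mem hd)
              have := pvNorm_eq_space_iff d
              rw [hnd] at this
              simpa using this.symm
            have hend : pvEndsWs (c :: t) = true := by
              unfold pvEndsWs
              obtain ⟨x, hx⟩ : ∃ x, (w :: u').getLast? = some x :=
                ⟨(w :: u').getLast (by simp), List.getLast?_eq_some_getLast (by simp)⟩
              have hlast : (c :: t).getLast? = some x := by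
                rw [show c :: t = (c :: t.takeWhile (fun d => !pvWs d)) ++ (w :: u') from by
                  rw [← hu]; simp [htne]]
                rw [List.getLast?_append, hx]; rfl
              rw [hlast]
              exact huws x (List.mem_of_getLast? hx)
            have hJne : pvJ (c :: t) ≠ [] := by rw [hJ, hu, hP]; simp
            rw [← hfu, ihu, hJu0, hPadu, hP]
            have hpad : pvPad (c :: t) = [' '] := by
              unfold pvPad
              rw [hend]
              simp [List.isEmpty_eq_false_iff, hJne]
            rw [hpad]
            simp
          · -- more words follow
            have hJune : pvJ (w :: u') ≠ [] := by
              rcases hPc : pvWords (List.map pvNorm (w :: u')) with _ | ⟨w0, P'⟩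
              · exact absurd hPc hP
              · have hw0 : w0 ≠ [] := pvWords_ne_nil (by rw [hPc]; exact List.mem_cons_self)
                rw [hJu, hPc, pvInter_cons]
                cases w0 with
                | nil => exact absurd rfl hw0
                | cons a b => simp
            have hJne : pvJ (c :: t) ≠ [] := by rw [hJ, hu]; simp
            have hlast : (c :: t).getLast? = (w :: u').getLast? := by
              obtain ⟨x, hx⟩ : ∃ x, (w :: u').getLast? = some x :=
                ⟨(w :: u').getLast (by simp), List.getLast?_eq_some_getLast (by simp)⟩
              rw [show c :: t = (c :: t.takeWhile (fun d => !pvWs d)) ++ (w :: u') from by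
                rw [← hu]; simp [htne]]
              rw [List.getLast?_append, hx]; rfl
            have hend : pvEndsWs (c :: t) = pvEndsWs (w :: u') := by
              unfold pvEndsWs; rw [hlast]
            have hpad : pvPad (c :: t) = pvPad (w :: u') := by
              unfold pvPad
              rw [hend]
              rw [List.isEmpty_eq_false_iff.mpr hJne, List.isEmpty_eq_false_iff.mpr hJune]
            rw [← hfu, ihu, hJu, hpad, if_neg hP]
            simp [List.append_assoc]

theorem pvFC_false_eq (l : List Char) : pvFC false l = pvLead l ++ pvFC true l := by
  cases l with
  | nil => simp [pvFC, pvLead]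
  | cons c t =>
    by_cases h : pvWs c = true
    · simp [pvFC, pvLead, h]
    · simp only [Bool.not_eq_true] at h
      simp [pvFC, pvLead, h]

theorem pvStrip_cons_space (x : List Char) : PySem.Chars.strip (' ' :: x) = PySem.Chars.strip x := by
  unfold PySem.Chars.strip PySem.Chars.lstrip
  rw [List.dropWhile_cons, if_pos (by decide)]

theorem pvStrip_append_space (x : List Char) : PySem.Chars.strip (x ++ [' ']) = PySem.Chars.strip x := by
  unfold PySem.Chars.strip PySem.Chars.lstrip PySem.Chars.rstrip
  rw [List.dropWhile_append]
  by_cases hx : (List.dropWhile PySem.Chars.isspace x).isEmpty = true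
  · rw [if_pos hx]
    rw [List.isEmpty_iff.mp hx]
    decide
  · rw [if_neg hx]
    rw [List.reverse_append]
    rw [show ([' '] : List Char).reverse = [' '] from rfl]
    rw [show ([' '] : List Char) ++ (List.dropWhile PySem.Chars.isspace x).reverse
        = ' ' :: (List.dropWhile PySem.Chars.isspace x).reverse from rfl]
    rw [List.dropWhile_cons, if_pos (by decide)]

theorem pvStrip_wrap (s lead pad : List Char)
    (hl : lead = [] ∨ lead = [' ']) (hp : pad = [] ∨ pad = [' ']) :
    PySem.Chars.strip (lead ++ s ++ pad) = PySem.Chars.strip s := by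
  have h1 : PySem.Chars.strip (lead ++ s ++ pad) = PySem.Chars.strip (s ++ pad) := by
    rcases hl with rfl | rfl
    · simp
    · rw [show ([' '] : List Char) ++ s ++ pad = ' ' :: (s ++ pad) from by simp]
      exact pvStrip_cons_space _
  rw [h1]
  rcases hp with rfl | rfl
  · simp
  · exact pvStrip_append_space s

-- ===== VERDICT (by name: the statement is the Claim_ definition above) =====
theorem vectorSkipWhitespaceDecoder_spec : Claim_equal_vectorSkipWhitespaceDecoder := by
  intro output _
  unfold Spec_vectorSkipWhitespaceDecoder vectorSkipWhitespaceDecoder vectorSkipWhitespaceDecoder_alt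
  rw [pvLoopA_eq_fc output.toList.length output.toList le_rfl [] false]
  rw [pvFC_false_eq, pvFC_true_eq (pvStripBrackets output.toList).length _ le_rfl]
  have hl : pvLead (pvStripBrackets output.toList) = []
      ∨ pvLead (pvStripBrackets output.toList) = [' '] := by
    unfold pvLead
    rcases pvStripBrackets output.toList with _ | ⟨c, t⟩
    · exact Or.inl rfl
    · by_cases h : pvWs c = true <;> simp [h]
  have hp : pvPad (pvStripBrackets output.toList) = []
      ∨ pvPad (pvStripBrackets output.toList) = [' '] := by
    unfold pvPad; split
    · exact Or.inr rfl
    · exact Or.inl rfl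
  rw [show ([] : List Char) ++ (pvLead (pvStripBrackets output.toList)
        ++ (pvJ (pvStripBrackets output.toList) ++ pvPad (pvStripBrackets output.toList)))
      = pvLead (pvStripBrackets output.toList) ++ pvJ (pvStripBrackets output.toList)
        ++ pvPad (pvStripBrackets output.toList) from by simp]
  rw [pvStrip_wrap _ _ _ hl hp]
  rfl
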